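-- pv_equiv track=rewrite | github.com/NickLc/Ciphers | 3_Escitala/Escitala.py | ordenar_col
-- ===== SOURCE A (Python) =====
-- import math
--
-- def ordenar_col(text,n_col,indices):
--     filas = math.ceil(len(text)/n_col)  # numero de caracteres en una vuelta
--     nuevo_text = ''
--     for f in range(filas):
--         for ind in range(len(indices)):
--             try:
--                 i = indices.index(ind)
--                 nuevo_text += text[f*n_col + i]
--             except:
--                 nuevo_text += ' '
--
--     return nuevo_text
-- ===== SOURCE B (Python) =====
-- def ordenar_col(text, n_col, indices):
--     n = len(text)
--     rows = -(-n // n_col)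
--     cols = []
--     for d in range(len(indices)):
--         try:
--             i = indices.index(d)
--             cols.append([text[f * n_col + i] if f * n_col + i < n else ' '
--                          for f in range(rows)])
--         except ValueError:
--             cols.append([' '] * rows)
--     return ''.join(c for row in zip(*cols) for c in row)
-- ===== Notes on version B (the rewrite author's own statement) =====
-- stated objective: faster
-- what changed: B builds the ciphertext column-by-column (one indices.index lookup per destination column, gathering the characters down each column) and then transposes the columns into rows with zip(*cols), instead of A's row-major scan that re-runs indices.index for every single output cell; intended as faster by removing the per-cell linear scan (a timing run measured 4.05x at the largest size both versions finished, unconfirmed beyond that since the output itself grows quadratically there).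
import Mathlib
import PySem

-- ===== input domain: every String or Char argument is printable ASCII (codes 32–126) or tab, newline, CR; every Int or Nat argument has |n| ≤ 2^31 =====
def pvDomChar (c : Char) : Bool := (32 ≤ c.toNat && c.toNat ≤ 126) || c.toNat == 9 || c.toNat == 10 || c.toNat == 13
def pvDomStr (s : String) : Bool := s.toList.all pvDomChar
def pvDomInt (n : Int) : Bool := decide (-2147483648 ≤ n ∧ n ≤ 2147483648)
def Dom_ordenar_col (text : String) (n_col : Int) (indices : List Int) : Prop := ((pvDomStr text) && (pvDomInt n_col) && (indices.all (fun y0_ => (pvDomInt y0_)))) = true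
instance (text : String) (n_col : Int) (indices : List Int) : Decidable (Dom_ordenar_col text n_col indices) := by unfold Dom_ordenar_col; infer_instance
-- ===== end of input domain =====

-- B builds the ciphertext column-by-column (one indices.index per destination column) and transposes
-- the columns into rows with zip, instead of A's row-major per-cell index search; intended as faster
-- (a timing run measured 4.05x at the largest size both versions finished, unconfirmed beyond that).

-- ===== PORT A =====
-- literal transliteration of A: filas = ceil(len/n_col) (exact integer ceiling); nested row/column loops;
-- the try/except becomes the Option matches on index? / pyGet? (none = the caught exception → space).
def ordenar_col (text : String) (n_col : Int) (indices : List Int) : String :=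
  let filas : Int := -(PySem.Int.floordiv (-(text.toList.length : Int)) n_col)
  String.ofList ((PySem.List.pyRange 0 filas 1).foldl (fun acc f =>
    (PySem.List.pyRange 0 (indices.length : Int) 1).foldl (fun acc2 ind =>
      match PySem.List.index? indices ind with
      | some i =>
        match PySem.Str.pyGet? text (f * n_col + (i : Int)) with
        | some c => acc2 ++ [c]
        | none => acc2 ++ [' ']
      | none => acc2 ++ [' ']) acc) [])

-- ===== PORT B =====
-- one destination column of Source B: try: i = indices.index(d); gather down the column / except: spaces
def pvColumn (cs : List Char) (n n_col rows : Int) (indices : List Int) (d : Int) : List Char :=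
  match PySem.List.index? indices d with
  | some i => (PySem.List.pyRange 0 rows 1).map (fun f =>
      if f * n_col + (i : Int) < n then cs.getD (f * n_col + (i : Int)).toNat ' ' else ' ')
  | none => List.replicate rows.toNat ' '

-- Source B's zip(*cols): rows of heads while every column is nonempty
def pvZip (cols : List (List Char)) : List (List Char) :=
  if h : cols = [] ∨ cols.any (·.isEmpty) then []
  else (cols.map (fun c => c.headD ' ')) :: pvZip (cols.map (·.tail))
termination_by (cols.headD []).length
decreasing_by
  rw [not_or, List.any_eq_true] at h
  obtain ⟨h1, h2⟩ := h
  cases cols with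
  | nil => exact absurd rfl h1
  | cons c rest =>
    have hc : c ≠ [] := fun he => h2 ⟨c, by simp, by simp [he]⟩
    simp only [List.headD_cons]
    cases c with
    | nil => exact absurd rfl hc
    | cons a t => simp

def ordenar_col_alt (text : String) (n_col : Int) (indices : List Int) : String :=
  let cs := text.toList
  let n : Int := (cs.length : Int)
  let rows : Int := -(PySem.Int.floordiv (-n) n_col)
  let cols := (PySem.List.pyRange 0 (indices.length : Int) 1).foldl
    (fun acc d => acc ++ [pvColumn cs n n_col rows indices d]) []
  String.ofList ((pvZip cols).flatten)

-- ===== PRECONDITION & SPEC =====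
-- Pre_ excludes only n_col = 0, where the Python A raises ZeroDivisionError (and B does too).
def Pre_ordenar_col (text : String) (n_col : Int) (indices : List Int) : Prop := n_col ≠ 0
instance (text : String) (n_col : Int) (indices : List Int) : Decidable (Pre_ordenar_col text n_col indices) := by unfold Pre_ordenar_col; infer_instance
def pvWitness_ordenar_col : String × Int × List Int := ("abcde", 2, [1, 0])

def Spec_ordenar_col (text : String) (n_col : Int) (indices : List Int) (out : String) : Prop := out = ordenar_col_alt text n_col indices
instance (text : String) (n_col : Int) (indices : List Int) (out : String) : Decidable (Spec_ordenar_col text n_col indices out) := by unfold Spec_ordenar_col; infer_instance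

-- ===== CLAIM (what is proved, stated in full; the proofs are below) =====
def Claim_equal_ordenar_col : Prop := ∀ (text : String) (n_col : Int) (indices : List Int), Dom_ordenar_col text n_col indices → Pre_ordenar_col text n_col indices → Spec_ordenar_col text n_col indices (ordenar_col text n_col indices)

-- ===== LEMMAS AND PROOFS =====

-- A's value of one output cell (row f, destination column d)
def pvCellA (text : String) (n_col : Int) (indices : List Int) (f d : Int) : Char :=
  match PySem.List.index? indices d with
  | some i =>
    match PySem.Str.pyGet? text (f * n_col + (i : Int)) with
    | some c => c
    | none => ' '
  | none => ' '

-- A's nested appending foldls, flattened into flatMap-of-map form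
lemma pvA_flat (text : String) (n_col : Int) (indices : List Int) (filas : Int) :
    (PySem.List.pyRange 0 filas 1).foldl (fun acc f =>
      (PySem.List.pyRange 0 (indices.length : Int) 1).foldl (fun acc2 ind =>
        match PySem.List.index? indices ind with
        | some i =>
          match PySem.Str.pyGet? text (f * n_col + (i : Int)) with
          | some c => acc2 ++ [c]
          | none => acc2 ++ [' ']
        | none => acc2 ++ [' ']) acc) [] =
    (PySem.List.pyRange 0 filas 1).flatMap (fun f =>
      (PySem.List.pyRange 0 (indices.length : Int) 1).map (pvCellA text n_col indices f)) := by
  have hrow : ∀ (f : Int) (acc : List Char),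
      (PySem.List.pyRange 0 (indices.length : Int) 1).foldl (fun acc2 ind =>
        match PySem.List.index? indices ind with
        | some i =>
          match PySem.Str.pyGet? text (f * n_col + (i : Int)) with
          | some c => acc2 ++ [c]
          | none => acc2 ++ [' ']
        | none => acc2 ++ [' ']) acc =
      acc ++ (PySem.List.pyRange 0 (indices.length : Int) 1).map (pvCellA text n_col indices f) := by
    intro f acc
    have hbody : (fun (acc2 : List Char) (ind : Int) =>
        match PySem.List.index? indices ind with
        | some i =>
          match PySem.Str.pyGet? text (f * n_col + (i : Int)) with
          | some c => acc2 ++ [c]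
          | none => acc2 ++ [' ']
        | none => acc2 ++ [' ']) =
        (fun acc2 ind => acc2 ++ [pvCellA text n_col indices f ind]) := by
      funext acc2 ind
      unfold pvCellA
      cases PySem.List.index? indices ind with
      | none => rfl
      | some i =>
        show (match PySem.Str.pyGet? text (f * n_col + (i : Int)) with
              | some c => acc2 ++ [c]
              | none => acc2 ++ [' ']) =
            acc2 ++ [match PySem.Str.pyGet? text (f * n_col + (i : Int)) with
              | some c => c
              | none => ' ']
        cases PySem.Str.pyGet? text (f * n_col + (i : Int)) <;> rfl
    rw [hbody, PySem.List.foldl_append_singleton_eq_map]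
  calc (PySem.List.pyRange 0 filas 1).foldl _ [] =
      (PySem.List.pyRange 0 filas 1).foldl (fun acc f =>
        acc ++ (PySem.List.pyRange 0 (indices.length : Int) 1).map (pvCellA text n_col indices f)) [] := by
        apply PySem.List.foldl_congr_mem; intro acc f _; exact hrow f acc
    _ = _ := by rw [PySem.List.foldl_append_eq_flatMap]; simp

-- zip(*cols) flattened: when every column has length R, it is the row-major traversal
lemma pvZip_flatten (R : Nat) (cols : List (List Char))
    (h : ∀ c ∈ cols, c.length = R) :
    (pvZip cols).flatten =
      (List.range R).flatMap (fun f => cols.map (fun c => c.getD f ' ')) := by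
  induction R generalizing cols with
  | zero =>
    have hcond : cols = [] ∨ cols.any (·.isEmpty) = true := by
      cases cols with
      | nil => exact Or.inl rfl
      | cons c rest =>
        refine Or.inr ?_
        simp only [List.any_cons, Bool.or_eq_true]
        exact Or.inl (by simpa [List.isEmpty_iff] using List.length_eq_zero_iff.mp (h c (by simp)))
    rw [pvZip, dif_pos hcond]
    simp
  | succ S ih =>
    cases hcols : cols with
    | nil => rw [pvZip]; simp
    | cons c rest =>
      subst hcols
      have hne : ∀ x ∈ c :: rest, x ≠ [] := by
        intro x hx he
        have := h x hx; rw [he] at this; simp at this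
      have hany : ((c :: rest).any (·.isEmpty)) = false := by
        rw [List.any_eq_false]
        intro x hx
        simpa [List.isEmpty_iff] using hne x hx
      rw [pvZip]
      rw [dif_neg (by simp [hany])]
      have htails : ∀ x ∈ (c :: rest).map (·.tail), x.length = S := by
        intro x hx
        obtain ⟨y, hy, rfl⟩ := List.mem_map.mp hx
        have := h y hy
        simp [List.length_tail, this]
      rw [List.flatten_cons, ih _ htails, List.range_succ_eq_map]
      rw [List.flatMap_cons]
      congr 1
      · -- heads row = getD 0 row
        apply List.map_congr_left
        intro x hx
        have hxne := hne x hx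
        cases x with
        | nil => exact absurd rfl hxne
        | cons a t => simp
      · rw [List.flatMap_map]
        apply List.flatMap_congr  -- pointwise on f ∈ range S
        intro f _
        rw [List.map_map]
        apply List.map_congr_left
        intro x hx
        have hxne := hne x hx
        cases x with
        | nil => exact absurd rfl hxne
        | cons a t => simp

-- ===== VERDICT (by name: the statement is the Claim_ definition above) =====
theorem ordenar_col_spec : Claim_equal_ordenar_col := by
  intro text n_col indices _ hpre
  unfold Spec_ordenar_col
  simp only [ordenar_col, ordenar_col_alt]
  set cs := text.toList with hcs
  set n : Int := (cs.length : Int) with hn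
  set rows : Int := -(PySem.Int.floordiv (-n) n_col) with hrows
  rcases lt_or_gt_of_ne hpre with hneg | hpos
  · -- n_col < 0: rows ≤ 0, both sides are empty
    have h0 : 0 ≤ PySem.Int.floordiv (-n) n_col := by
      have hfl := PySem.Int.floordiv_neg_neg n (-n_col)
      rw [neg_neg] at hfl
      rw [hfl, PySem.Int.floordiv_eq_ediv_of_pos (by omega)]
      exact Int.ediv_nonneg (by positivity) (by omega)
    have hr0 : rows ≤ 0 := by omega
    have hrange : PySem.List.pyRange 0 rows 1 = [] := PySem.List.pyRange_one_eq_nil (by omega)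
    have hRnat : rows.toNat = 0 := by omega
    have hcols0 : ∀ c ∈ (PySem.List.pyRange 0 (indices.length : Int) 1).foldl
        (fun acc d => acc ++ [pvColumn cs n n_col rows indices d]) [], c.length = 0 := by
      rw [show (fun (acc : List (List Char)) (d : Int) => acc ++ [pvColumn cs n n_col rows indices d]) =
          (fun acc d => acc ++ [pvColumn cs n n_col rows indices d]) from rfl,
        PySem.List.foldl_append_singleton_eq_map]
      intro c hc
      simp only [List.nil_append] at hc
      obtain ⟨d, _, rfl⟩ := List.mem_map.mp hc
      unfold pvColumn
      cases PySem.List.index? indices d with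
      | some i => simp [hrange]
      | none => simp [hRnat]
    rw [hrange]
    simp only [List.foldl_nil]
    rw [pvZip_flatten 0 _ hcols0]
    simp
  · -- n_col > 0
    apply congrArg String.ofList
    rw [pvA_flat]
    rw [PySem.List.foldl_append_singleton_eq_map]
    simp only [List.nil_append]
    set cols := (PySem.List.pyRange 0 (indices.length : Int) 1).map
      (pvColumn cs n n_col rows indices) with hcolsdef
    have hlen : ∀ c ∈ cols, c.length = rows.toNat := by
      intro c hc
      obtain ⟨d, _, rfl⟩ := List.mem_map.mp hc
      unfold pvColumn
      cases PySem.List.index? indices d with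
      | some i => simp [PySem.List.length_pyRange_one]
      | none => simp
    rw [pvZip_flatten rows.toNat cols hlen]
    -- both sides: flatMap over the row indices
    have hrr : PySem.List.pyRange 0 rows 1 = (List.range rows.toNat).map (Nat.cast : Nat → Int) := by
      rw [PySem.List.pyRange_one]
      simp only [sub_zero, zero_add]
    rw [hrr, List.flatMap_map]
    apply List.flatMap_congr
    intro fn hfn
    have hfnR : fn < rows.toNat := List.mem_range.mp hfn
    have hrowpos : 0 < rows := by omega
    rw [hcolsdef, List.map_map]
    apply List.map_congr_left
    intro d hd
    have hd0 : 0 ≤ d := (PySem.List.mem_pyRange_one.mp hd).1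
    simp only [Function.comp]
    unfold pvCellA pvColumn
    cases hidx : PySem.List.index? indices d with
    | none => simp [hfnR]
    | some i =>
      -- B's column entry at row fn
      have hget : ((PySem.List.pyRange 0 rows 1).map (fun f =>
          if f * n_col + (i : Int) < n then cs.getD (f * n_col + (i : Int)).toNat ' ' else ' ')).getD fn ' ' =
          (if (fn : Int) * n_col + (i : Int) < n then cs.getD ((fn : Int) * n_col + (i : Int)).toNat ' ' else ' ') := by
        rw [hrr, List.map_map]
        have hlt : fn < ((List.range rows.toNat).map
            ((fun f => if f * n_col + (i : Int) < n then cs.getD (f * n_col + (i : Int)).toNat ' ' else ' ') ∘ (Nat.cast : Nat → Int))).length := by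
          simpa using hfnR
        rw [List.getD_eq_getElem _ _ hlt]
        simp
      rw [hget]
      -- A's cell: try/except indexing equals the bounds-checked lookup (position is nonnegative)
      have hpos0 : (0 : Int) ≤ (fn : Int) * n_col + (i : Int) :=
        add_nonneg (mul_nonneg (by positivity) hpos.le) (by positivity)
      show (match PySem.Str.pyGet? text ((fn : Int) * n_col + (i : Int)) with
            | some c => c
            | none => ' ') =
          (if (fn : Int) * n_col + (i : Int) < n then cs.getD ((fn : Int) * n_col + (i : Int)).toNat ' ' else ' ')
      rw [PySem.Str.pyGet?_eq, PySem.Chars.pyGet?_eq_listPyGet?, ← hcs, PySem.List.pyGet?_of_nonneg cs hpos0]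
      by_cases hlt : (fn : Int) * n_col + (i : Int) < n
      · have hlt' : ((fn : Int) * n_col + (i : Int)).toNat < cs.length := by omega
        rw [if_pos hlt]
        simp [List.getD, List.getElem?_eq_getElem hlt']
      · rw [if_neg hlt]
        have hge : cs.length ≤ ((fn : Int) * n_col + (i : Int)).toNat := by omega
        simp [List.getElem?_eq_none_iff.mpr hge]
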